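-- pv_equiv track=rewrite | github.com/mkafker/PokerBot | matt/my_bot.py | extract_actions
-- ===== SOURCE A (Python) =====
-- def extract_actions(single_history):
--     """
--     Takes a single string of history (no /) and
--     returns a list of actions in a form such as
--     ['c', '1r', '10r', 'f']
--     """
--     actions = []
--     current_action = ''
--     for item in single_history:
--         if item in ['a', 'c', 'f']:
--             actions.append(item)
--             current_action = ''
--         elif item.isdigit():
--             current_action += item
--         elif item == 'r':
--             actions.append(current_action + item)
--             current_action = ''
--     return actions
-- ===== SOURCE B (Python) =====
-- def extract_actions(single_history):
--     """
--     Takes a single string of history (no /) and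
--     returns a list of actions in a form such as
--     ['c', '1r', '10r', 'f']
--     """
--     kept = [ch for ch in single_history if ch in 'acfr' or ch.isdigit()]
--     tokens = []
--     i = 0
--     n = len(kept)
--     while i < n:
--         j = i
--         while j < n and kept[j].isdigit():
--             j += 1
--         if j < n and kept[j] == 'r':
--             tokens.append(''.join(kept[i:j + 1]))
--             i = j + 1
--         elif j > i:
--             i = j  # digit run not followed by 'r': discarded
--         else:
--             tokens.append(kept[i])
--             i += 1
--     return tokens
-- ===== Notes on version B (the rewrite author's own statement) =====
-- stated objective: alternative
-- what changed: Replaces A's char-by-char state machine with a digit accumulator by a two-phase tokenizer: first filter the string to the action alphabet (digits and 'acfr'), then scan digit-run spans and emit tokens span by span.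
import Mathlib
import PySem

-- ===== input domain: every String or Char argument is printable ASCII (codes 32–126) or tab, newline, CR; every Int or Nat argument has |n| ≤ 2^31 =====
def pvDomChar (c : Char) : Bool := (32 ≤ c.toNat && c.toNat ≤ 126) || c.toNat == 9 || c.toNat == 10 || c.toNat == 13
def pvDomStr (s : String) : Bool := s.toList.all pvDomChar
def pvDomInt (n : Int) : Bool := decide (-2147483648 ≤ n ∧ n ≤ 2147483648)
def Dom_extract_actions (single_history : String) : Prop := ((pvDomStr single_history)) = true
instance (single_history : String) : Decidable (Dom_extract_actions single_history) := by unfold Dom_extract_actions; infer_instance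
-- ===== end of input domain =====

-- B replaces A's char-by-char state machine by a filter + digit-run span tokenizer (objective: alternative, same cost).
-- On the ASCII domain, Python's single-char str.isdigit is exactly Char.isDigit.

-- ===== PORT A =====
-- A's loop body; state = (actions so far, current_action as a list of chars)
def pvStepA (st : List String × List Char) (item : Char) : List String × List Char :=
  if item = 'a' ∨ item = 'c' ∨ item = 'f' then (st.1 ++ [String.ofList [item]], [])
  else if item.isDigit then (st.1, st.2 ++ [item])
  else if item = 'r' then (st.1 ++ [String.ofList (st.2 ++ ['r'])], [])
  else st

def extract_actions (single_history : String) : List String :=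
  (single_history.toList.foldl pvStepA ([], [])).1

-- ===== PORT B =====
def pvKeep (c : Char) : Bool := c = 'a' || c = 'c' || c = 'f' || c = 'r' || c.isDigit

-- B's while loop over the filtered list: take the digit-run span (j), then decide by the char after it.
-- (For a non-digit head the span is empty, so the 'r'-check and the singleton branch both emit [c];
-- they are merged into the final else, exactly as B emits kept[i] and advances by one.)
def pvTok : List Char → List String
  | [] => []
  | c :: rest =>
    if c.isDigit then
      let tail := List.dropWhile Char.isDigit rest
      if tail.head? = some 'r' then
        String.ofList (c :: (List.takeWhile Char.isDigit rest ++ ['r'])) :: pvTok tail.tail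
      else pvTok tail
    else String.ofList [c] :: pvTok rest
  termination_by l => l.length
  decreasing_by
  · have h1 : (List.dropWhile Char.isDigit rest).tail.length ≤ (List.dropWhile Char.isDigit rest).length := by
      rw [List.length_tail]; omega
    have h2 := List.length_dropWhile_le Char.isDigit rest
    simpa using Nat.lt_succ_of_le (le_trans h1 h2)
  · have h2 := List.length_dropWhile_le Char.isDigit rest
    simpa using Nat.lt_succ_of_le h2
  · simp

def extract_actions_alt (single_history : String) : List String :=
  pvTok (single_history.toList.filter pvKeep)

-- ===== PRECONDITION & SPEC =====
def Spec_extract_actions (single_history : String) (out : List String) : Prop := out = extract_actions_alt single_history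
instance (single_history : String) (out : List String) : Decidable (Spec_extract_actions single_history out) := by unfold Spec_extract_actions; infer_instance

-- ===== CLAIM (what is proved, stated in full; the proofs are below) =====
def Claim_equal_extract_actions : Prop := ∀ (single_history : String), Dom_extract_actions single_history → Spec_extract_actions single_history (extract_actions single_history)

-- ===== LEMMAS AND PROOFS =====

-- A's fold, expressed as a direct recursion producing the emitted suffix
def pvFA : List Char → List Char → List String
  | [], _ => []
  | c :: rest, cur =>
    if c = 'a' ∨ c = 'c' ∨ c = 'f' then String.ofList [c] :: pvFA rest []
    else if c.isDigit then pvFA rest (cur ++ [c])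
    else if c = 'r' then String.ofList (cur ++ ['r']) :: pvFA rest []
    else pvFA rest cur

theorem pvFoldA_eq (l : List Char) : ∀ acc cur,
    (l.foldl pvStepA (acc, cur)).1 = acc ++ pvFA l cur := by
  induction l with
  | nil => simp [pvFA]
  | cons c rest ih =>
    intro acc cur
    by_cases h1 : c = 'a' ∨ c = 'c' ∨ c = 'f'
    · simp [pvStepA, pvFA, h1, ih]
    · by_cases h2 : c.isDigit
      · simp [pvStepA, pvFA, h1, h2, ih]
      · by_cases h3 : c = 'r'
        · simp [pvStepA, pvFA, h1, h2, h3, ih]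
        · simp [pvStepA, pvFA, h1, h2, h3, ih]

theorem pvFA_filter (l : List Char) : ∀ cur, pvFA l cur = pvFA (l.filter pvKeep) cur := by
  induction l with
  | nil => intro cur; simp
  | cons c rest ih =>
    intro cur
    by_cases hk : pvKeep c = true
    · rw [show List.filter pvKeep (c :: rest) = c :: rest.filter pvKeep by simp [List.filter, hk]]
      by_cases h1 : c = 'a' ∨ c = 'c' ∨ c = 'f'
      · simp [pvFA, h1, ih]
      · by_cases h2 : c.isDigit
        · simp [pvFA, h1, h2, ih]
        · by_cases h3 : c = 'r'
          · simp [pvFA, h1, h2, h3, ih]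
          · simp [pvFA, h1, h2, h3, ih]
    · simp [pvKeep, not_or] at hk
      obtain ⟨⟨⟨⟨ha, hc⟩, hf⟩, hr⟩, hd⟩ := hk
      rw [show List.filter pvKeep (c :: rest) = rest.filter pvKeep by
        simp [List.filter, pvKeep, ha, hc, hf, hr, hd]]
      simp [pvFA, ha, hc, hf, hr, hd, ih]

theorem pvSpan_digits (cur : List Char) (hcur : ∀ c ∈ cur, c.isDigit = true) (l : List Char) :
    List.takeWhile Char.isDigit (cur ++ l) = cur ++ List.takeWhile Char.isDigit l ∧
    List.dropWhile Char.isDigit (cur ++ l) = List.dropWhile Char.isDigit l := by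
  induction cur with
  | nil => simp
  | cons c rest ih =>
    have hc : c.isDigit = true := hcur c (by simp)
    have := ih (fun x hx => hcur x (by simp [hx]))
    simp [List.takeWhile, List.dropWhile, hc, this.1, this.2]

theorem pvFA_tok (l : List Char) : ∀ cur, (∀ c ∈ cur, c.isDigit = true) →
    (∀ c ∈ l, pvKeep c = true) → pvFA l cur = pvTok (cur ++ l) := by
  induction l with
  | nil =>
    intro cur hcur _
    rcases cur with _ | ⟨d, ds⟩
    · simp [pvFA, pvTok]
    · have hd : d.isDigit = true := hcur d (by simp)
      have hds : List.dropWhile Char.isDigit ds = [] := by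
        rw [List.dropWhile_eq_nil_iff]
        intro x hx; exact hcur x (by simp [hx])
      simp [pvFA, pvTok, hd, hds]
  | cons c rest ih =>
    intro cur hcur hl
    have hlrest : ∀ x ∈ rest, pvKeep x = true := fun x hx => hl x (by simp [hx])
    by_cases h2 : c.isDigit
    · -- digit: A accumulates; B's span absorbs it
      have h1 : ¬(c = 'a' ∨ c = 'c' ∨ c = 'f') := by
        rintro (rfl | rfl | rfl) <;> simp [Char.isDigit] at h2
      have := ih (cur ++ [c]) (by intro x hx; rcases List.mem_append.mp hx with h | h
                                  · exact hcur x h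
                                  · simp at h; simp [h, h2]) hlrest
      rw [show cur ++ c :: rest = (cur ++ [c]) ++ rest by simp]
      simp [pvFA, h1, h2, this]
    · -- non-digit head after the digit run cur
      have hspan := pvSpan_digits cur hcur (c :: rest)
      have hdrop : List.dropWhile Char.isDigit (c :: rest) = c :: rest := by
        simp [List.dropWhile, h2]
      have htake : List.takeWhile Char.isDigit (c :: rest) = [] := by
        simp [List.takeWhile, h2]
      by_cases h3 : c = 'r'
      · subst h3
        have h1 : ¬('r' = 'a' ∨ 'r' = 'c' ∨ 'r' = 'f') := by decide
        rcases cur with _ | ⟨d, ds⟩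
        · simp [pvFA, pvTok, h1, h2, ih [] (by simp) hlrest]
        · have hd : d.isDigit = true := hcur d (by simp)
          have hds : ∀ x ∈ ds, x.isDigit = true := fun x hx => hcur x (by simp [hx])
          have hspan' := pvSpan_digits ds hds ('r' :: rest)
          have hdrop' : List.dropWhile Char.isDigit (ds ++ 'r' :: rest) = 'r' :: rest := by
            rw [hspan'.2]; simp [List.dropWhile]
          have htake' : List.takeWhile Char.isDigit (ds ++ 'r' :: rest) = ds := by
            rw [hspan'.1]; simp [List.takeWhile]
          simp [pvFA, pvTok, h1, hd, hdrop', htake', ih [] (by simp) hlrest]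
      · -- c is 'a','c' or 'f' (the only kept non-digit non-'r' chars)
        have h1 : c = 'a' ∨ c = 'c' ∨ c = 'f' := by
          have := hl c (by simp)
          simp [pvKeep, h2, h3] at this
          tauto
        rcases cur with _ | ⟨d, ds⟩
        · simp [pvFA, pvTok, h1, h2, ih [] (by simp) hlrest]
        · have hd : d.isDigit = true := hcur d (by simp)
          have hds : ∀ x ∈ ds, x.isDigit = true := fun x hx => hcur x (by simp [hx])
          have hspan' := pvSpan_digits ds hds (c :: rest)
          have hdrop' : List.dropWhile Char.isDigit (ds ++ c :: rest) = c :: rest := by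
            rw [hspan'.2]; simp [List.dropWhile, h2]
          have hcr : c ≠ 'r' := h3
          -- pvTok (d :: ds ++ c :: rest) drops the digit run and re-enters at c
          have hstep : pvTok (d :: (ds ++ c :: rest)) = pvTok (c :: rest) := by
            simp [pvTok, hd, hdrop', hcr]
          have hstep2 : pvTok (c :: rest) = String.ofList [c] :: pvTok rest := by
            simp [pvTok, h2]
          simp only [List.cons_append] at *
          rw [hstep, hstep2]
          simp [pvFA, h1, ih [] (by simp) hlrest]

theorem extract_actions_eq (s : String) : extract_actions s = extract_actions_alt s := by
  have h1 : extract_actions s = pvFA s.toList [] := by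
    simpa [extract_actions] using pvFoldA_eq s.toList [] []
  rw [h1, pvFA_filter]
  have := pvFA_tok (s.toList.filter pvKeep) [] (by simp)
    (by intro c hc; exact (List.mem_filter.mp hc).2)
  simpa [extract_actions_alt] using this

-- ===== VERDICT (by name: the statement is the Claim_ definition above) =====
theorem extract_actions_spec : Claim_equal_extract_actions := by
  intro s _
  unfold Spec_extract_actions
  exact extract_actions_eq s
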